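-- pv_equiv track=rewrite | github.com/ocirne/ocirne-rosetta-stone | python/zahlenausschreiben.py | bar
-- ===== SOURCE A (Python) =====
-- numbers = {
--     1: "eins",
--     2: "zwei",
--     3: "drei",
--     4: "vier",
--     5: "fünf",
--     6: "sechs",
--     7: "sieben",
--     8: "acht",
--     9: "neun",
--     10: "zehn",
--     11: "elf",
--     12: "zwölf",
--     16: "sechzehn",
--     17: "siebzehn",
--     20: "zwanzig",
--     30: "dreißig",
--     60: "sechzig",
--     70: "siebzig",
--     100: "einhundert",
-- }
--
-- baz = [
--     ("eintausend", "tausend"),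
--     ("eine Million ", " Millionen "),
--     ("eine Milliarde ", " Milliarden "),
--     ("eine Billion ", " Billionen "),
--     ("eine Billiarde ", " Billiarden "),
--     ("eine Trillion ", " Trillionen "),
-- ]
--
-- def foo(i, p):
--     assert 0 <= i <= 999
--     if i in numbers:
--         if i == 1 and p > 0:
--             return "ein"
--         return numbers[i]
--     s = ""
--     f100, r100 = divmod(i, 100)
--     if f100 > 0:
--         if f100 == 1:
--             s += "einhundert"
--         else:
--             s += numbers[f100] + "hundert"
--     if r100 > 0 and r100 in numbers:
--         s += numbers[r100]
--     else:
--         zehner, einer = divmod(r100, 10)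
--         if zehner == 0:
--             s += numbers[einer]
--         else:
--             if einer == 0:
--                 if zehner * 10 in numbers:
--                     s += numbers[zehner * 10]
--                 else:
--                     s += numbers[zehner] + "zig"
--             elif einer == 1:
--                 s += "ein"
--                 if zehner > 1:
--                     s += "und"
--                 if zehner * 10 in numbers:
--                     s += numbers[zehner * 10]
--                 else:
--                     s += numbers[zehner] + "zig"
--             else:
--                 s += numbers[einer]
--                 if zehner > 1:
--                     s += "und"
--                 if zehner * 10 in numbers:
--                     s += numbers[zehner * 10]
--                 else:
--                     s += numbers[zehner] + "zig"
--     return s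
--
-- def bar(n, p=0):
--     d, r = divmod(n, 1000)
--     if d > 0:
--         if d == 1:
--             if r == 0:
--                 return baz[p][0]
--             else:
--                 return baz[p][0] + foo(r, p)
--         else:
--             if r == 0:
--                 return bar(d, p + 1)
--             else:
--                 return bar(d, p + 1) + baz[p][1] + foo(r, p)
--     return foo(r, p)
-- ===== SOURCE B (Python) =====
-- baz = [
--     ("eintausend", "tausend"),
--     ("eine Million ", " Millionen "),
--     ("eine Milliarde ", " Milliarden "),
--     ("eine Billion ", " Billionen "),
--     ("eine Billiarde ", " Billiarden "),
--     ("eine Trillion ", " Trillionen "),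
-- ]
--
-- _ONES = [None, "eins", "zwei", "drei", "vier", "fünf", "sechs", "sieben", "acht", "neun"]
-- _TEENS = ["zehn", "elf", "zwölf", "dreizehn", "vierzehn", "fünfzehn",
--           "sechzehn", "siebzehn", "achtzehn", "neunzehn"]
-- _TENS = ["zwanzig", "dreißig", "vierzig", "fünfzig", "sechzig", "siebzig", "achtzig", "neunzig"]
--
--
-- def _group(i, p):
--     # spell one 0..999 group from fixed ones/teens/tens tables
--     if i == 100:
--         return "einhundert"
--     h, r = divmod(i, 100)
--     s = ("einhundert" if h == 1 else _ONES[h] + "hundert") if h > 0 else ""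
--     if r < 10:
--         s += "ein" if (r == 1 and h == 0 and p > 0) else _ONES[r]
--     elif r < 20:
--         s += _TEENS[r - 10]
--     else:
--         z, e = divmod(r, 10)
--         if e == 0:
--             s += _TENS[z - 2]
--         elif e == 1:
--             s += "einund" + _TENS[z - 2]
--         else:
--             s += _ONES[e] + "und" + _TENS[z - 2]
--     return s
--
--
-- def bar(n, p=0):
--     # iterative: collect one piece per 1000-group low-to-high, then join reversed
--     parts = []
--     while True:
--         d, r = divmod(n, 1000)
--         if d <= 0:
--             parts.append(_group(r, p))
--             break
--         if d == 1:
--             parts.append(baz[p][0] if r == 0 else baz[p][0] + _group(r, p))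
--             break
--         if r > 0:
--             parts.append(baz[p][1] + _group(r, p))
--         n, p = d, p + 1
--     return "".join(reversed(parts))
-- ===== Notes on version B (the rewrite author's own statement) =====
-- stated objective: alternative
-- what changed: bar's right-recursion is replaced by a while-loop collecting one piece per 1000-group and joining the reversed list, and the dict-driven helper foo is replaced by a table-driven group speller over fixed ones/teens/tens word lists.
-- outside the precondition, e.g. on bar(0, 0): A raises KeyError, B raises TypeError; on bar(500, 0): A raises KeyError, B raises TypeError; on bar(1000, 7): A raises IndexError, B raises IndexError
import Mathlib
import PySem

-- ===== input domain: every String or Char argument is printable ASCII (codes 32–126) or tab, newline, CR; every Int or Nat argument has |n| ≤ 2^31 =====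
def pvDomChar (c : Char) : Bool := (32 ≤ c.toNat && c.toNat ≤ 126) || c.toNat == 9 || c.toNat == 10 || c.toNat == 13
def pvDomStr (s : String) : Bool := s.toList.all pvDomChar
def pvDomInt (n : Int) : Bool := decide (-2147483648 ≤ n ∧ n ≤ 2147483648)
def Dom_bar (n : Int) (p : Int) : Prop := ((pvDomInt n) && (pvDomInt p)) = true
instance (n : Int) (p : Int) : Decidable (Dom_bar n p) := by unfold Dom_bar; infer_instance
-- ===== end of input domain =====

-- B replaces bar's right-recursion by a while-loop over 1000-groups joined in reverse, and replaces
-- the dict-driven helper foo by a table-driven group speller over ones/teens/tens lists (objective: alternative).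

-- ===== PORT A =====

-- the module-level dict `numbers` (Python dict lookup; KeyError = none, excluded by Pre_)
def numbersD : PySem.Dict Int String := PySem.Dict.ofList
  [(1, "eins"), (2, "zwei"), (3, "drei"), (4, "vier"), (5, "fünf"), (6, "sechs"),
   (7, "sieben"), (8, "acht"), (9, "neun"), (10, "zehn"), (11, "elf"), (12, "zwölf"),
   (16, "sechzehn"), (17, "siebzehn"), (20, "zwanzig"), (30, "dreißig"), (60, "sechzig"),
   (70, "siebzig"), (100, "einhundert")]

def numMem (i : Int) : Bool := (PySem.Dict.get? numbersD i).isSome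
def numGet (i : Int) : String := (PySem.Dict.get? numbersD i).getD ""

-- the module-level list `baz`; baz[p] with Python (possibly negative) indexing; IndexError = none, excluded by Pre_
def bazL : List (String × String) :=
  [("eintausend", "tausend"), ("eine Million ", " Millionen "), ("eine Milliarde ", " Milliarden "),
   ("eine Billion ", " Billionen "), ("eine Billiarde ", " Billiarden "), ("eine Trillion ", " Trillionen ")]

def bazGet (p : Int) : String × String := (PySem.List.pyGet? bazL p).getD ("", "")

-- foo: A's helper, transliterated (the assert holds on every call bar makes: 0 <= n % 1000 <= 999)
def fooP (i : Int) (p : Int) : String :=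
  if numMem i then
    (if i = 1 ∧ p > 0 then "ein" else numGet i)
  else
    let f100 := PySem.Int.floordiv i 100
    let r100 := PySem.Int.mod i 100
    let s : String := ""
    let s := if f100 > 0 then (if f100 = 1 then s ++ "einhundert" else s ++ numGet f100 ++ "hundert") else s
    if r100 > 0 ∧ numMem r100 then s ++ numGet r100
    else
      let zehner := PySem.Int.floordiv r100 10
      let einer := PySem.Int.mod r100 10
      if zehner = 0 then s ++ numGet einer
      else if einer = 0 then
        (if numMem (zehner * 10) then s ++ numGet (zehner * 10) else s ++ numGet zehner ++ "zig")
      else if einer = 1 then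
        let s := s ++ "ein"
        let s := if zehner > 1 then s ++ "und" else s
        (if numMem (zehner * 10) then s ++ numGet (zehner * 10) else s ++ numGet zehner ++ "zig")
      else
        let s := s ++ numGet einer
        let s := if zehner > 1 then s ++ "und" else s
        (if numMem (zehner * 10) then s ++ numGet (zehner * 10) else s ++ numGet zehner ++ "zig")

-- termination fact both recursions cite: d = n // 1000 strictly shrinks while positive
lemma bar_dec (n : Int) (h : 0 < PySem.Int.floordiv n 1000) :
    (PySem.Int.floordiv n 1000).toNat < n.toNat := by
  have h1 := PySem.Int.floordiv_mul_add_mod n 1000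
  have h2 := PySem.Int.mod_nonneg n (b := 1000) (by norm_num)
  have h3 := PySem.Int.mod_lt n (b := 1000) (by norm_num)
  omega

def bar (n : Int) (p : Int) : String :=
  if h : PySem.Int.floordiv n 1000 > 0 then
    if PySem.Int.floordiv n 1000 = 1 then
      if PySem.Int.mod n 1000 = 0 then (bazGet p).1
      else (bazGet p).1 ++ fooP (PySem.Int.mod n 1000) p
    else
      if PySem.Int.mod n 1000 = 0 then bar (PySem.Int.floordiv n 1000) (p + 1)
      else bar (PySem.Int.floordiv n 1000) (p + 1) ++ (bazGet p).2 ++ fooP (PySem.Int.mod n 1000) p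
  else fooP (PySem.Int.mod n 1000) p
termination_by n.toNat
decreasing_by all_goals exact bar_dec n h

-- ===== PORT B =====

-- B's tables; index 0 of _ONES is Python None (never read on admitted inputs; "" stands in for it)
def onesL : List String := ["", "eins", "zwei", "drei", "vier", "fünf", "sechs", "sieben", "acht", "neun"]
def teensL : List String := ["zehn", "elf", "zwölf", "dreizehn", "vierzehn", "fünfzehn", "sechzehn", "siebzehn", "achtzehn", "neunzehn"]
def tensL : List String := ["zwanzig", "dreißig", "vierzig", "fünfzig", "sechzig", "siebzig", "achtzig", "neunzig"]

def onesGet (i : Int) : String := (PySem.List.pyGet? onesL i).getD ""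
def teensGet (i : Int) : String := (PySem.List.pyGet? teensL i).getD ""
def tensGet (i : Int) : String := (PySem.List.pyGet? tensL i).getD ""

-- B's _group: table-driven speller for one 0..999 group
def grpP (i : Int) (p : Int) : String :=
  if i = 100 then "einhundert"
  else
    let h := PySem.Int.floordiv i 100
    let r := PySem.Int.mod i 100
    let s := if h > 0 then (if h = 1 then "einhundert" else onesGet h ++ "hundert") else ""
    if r < 10 then s ++ (if r = 1 ∧ h = 0 ∧ p > 0 then "ein" else onesGet r)
    else if r < 20 then s ++ teensGet (r - 10)
    else
      let z := PySem.Int.floordiv r 10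
      let e := PySem.Int.mod r 10
      if e = 0 then s ++ tensGet (z - 2)
      else if e = 1 then s ++ ("einund" ++ tensGet (z - 2))
      else s ++ (onesGet e ++ "und" ++ tensGet (z - 2))

-- B's while-loop: parts collected low group first, then "".join(reversed(parts))
def barLoop (n : Int) (p : Int) (parts : List String) : List String :=
  if PySem.Int.floordiv n 1000 ≤ 0 then
    parts ++ [grpP (PySem.Int.mod n 1000) p]
  else if PySem.Int.floordiv n 1000 = 1 then
    parts ++ [if PySem.Int.mod n 1000 = 0 then (bazGet p).1
              else (bazGet p).1 ++ grpP (PySem.Int.mod n 1000) p]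
  else
    barLoop (PySem.Int.floordiv n 1000) (p + 1)
      (if PySem.Int.mod n 1000 > 0 then parts ++ [(bazGet p).2 ++ grpP (PySem.Int.mod n 1000) p] else parts)
termination_by n.toNat
decreasing_by all_goals exact bar_dec n (by omega)

def bar_alt (n : Int) (p : Int) : String :=
  PySem.Str.join "" (barLoop n p []).reverse

-- ===== PRECONDITION & SPEC =====

-- foo(i, p) returns (no KeyError) for a group i in 0..999 exactly when i = 100 or i % 100 != 0
def fooOK_bar (i : Int) : Prop := i = 100 ∨ PySem.Int.mod i 100 ≠ 0
-- baz[q] is a valid (possibly negative) Python index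
def idxOK_bar (q : Int) : Prop := -6 ≤ q ∧ q ≤ 5
-- the k-th 1000-group of n
def grp_bar (n : Int) (k : Nat) : Int := PySem.Int.mod (PySem.Int.floordiv n (1000 ^ k)) 1000
-- a non-top group g at level k: skipped if 0, else needs baz[p+k] and foo(g)
def levOK_bar (p : Int) (k : Int) (g : Int) : Prop := g = 0 ∨ (idxOK_bar (p + k) ∧ fooOK_bar g)

-- Pre_bar: exactly the (n, p) with |n| ≤ 2^31 (the stated Dom) on which A returns normally —
-- excluded are the KeyError of numbers[0] (foo of a group ≡ 0 mod 100 other than 100, e.g. n = 0 or n = 500)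
-- and the IndexError of baz[p+k] outside -6..5; the group-count cases stop at 1000^4 > 2^31.
def Pre_bar (n : Int) (p : Int) : Prop :=
  if n < 1 then fooOK_bar (PySem.Int.mod n 1000)
  else if n < 1000 then fooOK_bar n
  else if n < 1000000 then
    levOK_bar p 0 (grp_bar n 0) ∧ (if grp_bar n 1 = 1 then idxOK_bar p else fooOK_bar (grp_bar n 1))
  else if n < 1000000000 then
    levOK_bar p 0 (grp_bar n 0) ∧ levOK_bar p 1 (grp_bar n 1) ∧
      (if grp_bar n 2 = 1 then idxOK_bar (p + 1) else fooOK_bar (grp_bar n 2))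
  else
    levOK_bar p 0 (grp_bar n 0) ∧ levOK_bar p 1 (grp_bar n 1) ∧ levOK_bar p 2 (grp_bar n 2) ∧
      (if grp_bar n 3 = 1 then idxOK_bar (p + 2) else fooOK_bar (grp_bar n 3))

instance (n : Int) (p : Int) : Decidable (Pre_bar n p) := by
  unfold Pre_bar levOK_bar idxOK_bar fooOK_bar grp_bar; infer_instance

def pvWitness_bar : Int × Int := (1234567, 0)

def Spec_bar (n : Int) (p : Int) (out : String) : Prop := out = bar_alt n p
instance (n : Int) (p : Int) (out : String) : Decidable (Spec_bar n p out) := by unfold Spec_bar; infer_instance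

-- ===== CLAIM (what is proved, stated in full; the proofs are below) =====
def Claim_equal_bar : Prop := ∀ (n : Int) (p : Int), Dom_bar n p → Pre_bar n p → Spec_bar n p (bar n p)

-- ===== LEMMAS AND PROOFS =====

-- the two spellers only see p through 'p > 0'
lemma fooP_pfix (i p : Int) :
    fooP i p = fooP i (if 0 < p then 1 else 0) := by
  by_cases hp : 0 < p
  · have h : ∀ a : Prop, (a ∧ p > 0) ↔ (a ∧ (1 : Int) > 0) :=
      fun a => ⟨fun ⟨x, _⟩ => ⟨x, one_pos⟩, fun ⟨x, _⟩ => ⟨x, hp⟩⟩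
    rw [if_pos hp]; unfold fooP; simp only [h]
  · have h : ∀ a : Prop, (a ∧ p > 0) ↔ (a ∧ (0 : Int) > 0) :=
      fun a => ⟨fun ⟨_, b⟩ => absurd b hp, fun ⟨_, b⟩ => absurd b (by omega)⟩
    rw [if_neg hp]; unfold fooP; simp only [h]

lemma grpP_pfix (i p : Int) :
    grpP i p = grpP i (if 0 < p then 1 else 0) := by
  by_cases hp : 0 < p
  · have h : ∀ a : Prop, (a ∧ p > 0) ↔ (a ∧ (1 : Int) > 0) :=
      fun a => ⟨fun ⟨x, _⟩ => ⟨x, one_pos⟩, fun ⟨x, _⟩ => ⟨x, hp⟩⟩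
    rw [if_pos hp]; unfold grpP; simp only [h]
  · have h : ∀ a : Prop, (a ∧ p > 0) ↔ (a ∧ (0 : Int) > 0) :=
      fun a => ⟨fun ⟨_, b⟩ => absurd b hp, fun ⟨_, b⟩ => absurd b (by omega)⟩
    rw [if_neg hp]; unfold grpP; simp only [h]

-- the finite check: foo and _group agree on every group 0..999, at p = 0 and p = 1
set_option maxRecDepth 100000 in
set_option maxHeartbeats 2000000 in
lemma foo_grp_range :
    (List.range 1000).all
      (fun k => (fooP (k : Int) 0 == grpP (k : Int) 0) && (fooP (k : Int) 1 == grpP (k : Int) 1)) = true := by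
  decide

lemma foo_eq_grp (i p : Int) (h0 : 0 ≤ i) (h1 : i < 1000) : fooP i p = grpP i p := by
  have hk : i = ((i.toNat : Nat) : Int) := by omega
  have hmem : i.toNat ∈ List.range 1000 := List.mem_range.mpr (by omega)
  have := List.all_eq_true.mp foo_grp_range _ hmem
  have hb := Bool.and_elim_left this
  have hb1 := Bool.and_elim_right this
  have e0 : fooP i 0 = grpP i 0 := by rw [hk]; exact eq_of_beq hb
  have e1 : fooP i 1 = grpP i 1 := by rw [hk]; exact eq_of_beq hb1
  rw [fooP_pfix i p, grpP_pfix i p]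
  by_cases hp : 0 < p
  · simp only [if_pos hp]; exact e1
  · simp only [if_neg hp]; exact e0

-- proof-side copy of B's loop with A's speller in the leaves
def barLoopA (n : Int) (p : Int) (parts : List String) : List String :=
  if PySem.Int.floordiv n 1000 ≤ 0 then
    parts ++ [fooP (PySem.Int.mod n 1000) p]
  else if PySem.Int.floordiv n 1000 = 1 then
    parts ++ [if PySem.Int.mod n 1000 = 0 then (bazGet p).1
              else (bazGet p).1 ++ fooP (PySem.Int.mod n 1000) p]
  else
    barLoopA (PySem.Int.floordiv n 1000) (p + 1)
      (if PySem.Int.mod n 1000 > 0 then parts ++ [(bazGet p).2 ++ fooP (PySem.Int.mod n 1000) p] else parts)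
termination_by n.toNat
decreasing_by all_goals exact bar_dec n (by omega)

lemma mod1000_bounds (n : Int) : 0 ≤ PySem.Int.mod n 1000 ∧ PySem.Int.mod n 1000 < 1000 :=
  ⟨PySem.Int.mod_nonneg n (by norm_num), PySem.Int.mod_lt n (by norm_num)⟩

lemma barLoop_eq_A : ∀ (m : Nat) (n p : Int) (acc : List String), n.toNat ≤ m →
    barLoop n p acc = barLoopA n p acc := by
  intro m
  induction m with
  | zero =>
    intro n p acc h
    have hd : PySem.Int.floordiv n 1000 ≤ 0 := by
      by_contra hc
      have := bar_dec n (by omega)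
      omega
    rw [barLoop, barLoopA, if_pos hd, if_pos hd,
        foo_eq_grp _ p (mod1000_bounds n).1 (mod1000_bounds n).2]
  | succ k ih =>
    intro n p acc h
    rw [barLoop, barLoopA]
    have hb := mod1000_bounds n
    by_cases hd : PySem.Int.floordiv n 1000 ≤ 0
    · rw [if_pos hd, if_pos hd, foo_eq_grp _ p hb.1 hb.2]
    · by_cases h1 : PySem.Int.floordiv n 1000 = 1
      · rw [if_neg hd, if_pos h1, if_neg hd, if_pos h1, foo_eq_grp _ p hb.1 hb.2]
      · have hlt := bar_dec n (by omega)
        rw [if_neg hd, if_neg h1, if_neg hd, if_neg h1, foo_eq_grp _ p hb.1 hb.2]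
        exact ih _ _ _ (by omega)

lemma str_eq_of_toList {s t : String} (h : s.toList = t.toList) : s = t := by
  rw [← String.ofList_toList (s := s), h, String.ofList_toList]

lemma join_empty_cons (s : String) (l : List String) :
    PySem.Str.join "" (s :: l) = s ++ PySem.Str.join "" l := by
  apply str_eq_of_toList
  cases l with
  | nil =>
    simp [PySem.Str.toList_join, PySem.Chars.join_singleton, PySem.Chars.join_nil,
      String.toList_append]
  | cons t ts =>
    simp [PySem.Str.toList_join, PySem.Chars.join_cons_cons, String.toList_append]

lemma join_empty_nil : PySem.Str.join "" ([] : List String) = "" := by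
  apply str_eq_of_toList
  simp [PySem.Str.toList_join, PySem.Chars.join_nil]

lemma join_empty_singleton (s : String) : PySem.Str.join "" [s] = s := by
  rw [join_empty_cons, join_empty_nil]
  simp

lemma join_empty_snoc (l : List String) (s : String) :
    PySem.Str.join "" (l ++ [s]) = PySem.Str.join "" l ++ s := by
  induction l with
  | nil =>
    rw [List.nil_append, join_empty_singleton, join_empty_nil]
    simp
  | cons t ts ih =>
    rw [List.cons_append, join_empty_cons, ih, join_empty_cons, String.append_assoc]

lemma barLoopA_acc : ∀ (m : Nat) (n p : Int) (acc : List String), n.toNat ≤ m →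
    barLoopA n p acc = acc ++ barLoopA n p [] := by
  intro m
  induction m with
  | zero =>
    intro n p acc h
    have hd : PySem.Int.floordiv n 1000 ≤ 0 := by
      by_contra hc
      have := bar_dec n (by omega)
      omega
    conv_lhs => rw [barLoopA]
    conv_rhs => rw [barLoopA]
    rw [if_pos hd, if_pos hd, List.nil_append]
  | succ k ih =>
    intro n p acc h
    conv_lhs => rw [barLoopA]
    conv_rhs => rw [barLoopA]
    by_cases hd : PySem.Int.floordiv n 1000 ≤ 0
    · rw [if_pos hd, if_pos hd, List.nil_append]
    · by_cases h1 : PySem.Int.floordiv n 1000 = 1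
      · rw [if_neg hd, if_pos h1, if_neg hd, if_pos h1, List.nil_append]
      · have hlt := bar_dec n (by omega)
        rw [if_neg hd, if_neg h1, if_neg hd, if_neg h1]
        by_cases hr : PySem.Int.mod n 1000 > 0
        · rw [if_pos hr, if_pos hr]
          rw [ih _ _ (acc ++ [(bazGet p).2 ++ fooP (PySem.Int.mod n 1000) p]) (by omega),
              ih _ _ ([] ++ [(bazGet p).2 ++ fooP (PySem.Int.mod n 1000) p]) (by omega)]
          simp only [List.nil_append, List.append_assoc]
        · rw [if_neg hr, if_neg hr]
          exact ih _ _ acc (by omega)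

lemma bar_eq_loopA : ∀ (m : Nat) (n p : Int), n.toNat ≤ m →
    bar n p = PySem.Str.join "" (barLoopA n p []).reverse := by
  intro m
  induction m with
  | zero =>
    intro n p h
    have hd : PySem.Int.floordiv n 1000 ≤ 0 := by
      by_contra hc
      have := bar_dec n (by omega)
      omega
    conv_lhs => rw [bar]
    conv_rhs => rw [barLoopA]
    rw [dif_neg (by omega : ¬ PySem.Int.floordiv n 1000 > 0), if_pos hd, List.nil_append,
        List.reverse_singleton, join_empty_singleton]
  | succ k ih =>
    intro n p h
    conv_lhs => rw [bar]
    conv_rhs => rw [barLoopA]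
    by_cases hd : PySem.Int.floordiv n 1000 > 0
    · have hd' : ¬ PySem.Int.floordiv n 1000 ≤ 0 := by omega
      by_cases h1 : PySem.Int.floordiv n 1000 = 1
      · rw [dif_pos hd, if_pos h1, if_neg hd', if_pos h1, List.nil_append,
            List.reverse_singleton, join_empty_singleton]
      · have hlt := bar_dec n hd
        rw [dif_pos hd, if_neg h1, if_neg hd', if_neg h1]
        by_cases hr : PySem.Int.mod n 1000 = 0
        · have hr' : ¬ PySem.Int.mod n 1000 > 0 := by omega
          rw [if_pos hr, if_neg hr']
          exact ih _ _ (by omega)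
        · have hr' : PySem.Int.mod n 1000 > 0 := by
            have := PySem.Int.mod_nonneg n (b := 1000) (by norm_num)
            omega
          rw [if_neg hr, if_pos hr', List.nil_append]
          rw [barLoopA_acc k _ _ [(bazGet p).2 ++ fooP (PySem.Int.mod n 1000) p] (by omega)]
          rw [List.reverse_append, List.reverse_singleton, join_empty_snoc]
          rw [ih _ _ (by omega), String.append_assoc]
    · rw [dif_neg hd, if_pos (by omega : PySem.Int.floordiv n 1000 ≤ 0), List.nil_append,
          List.reverse_singleton, join_empty_singleton]

-- ===== VERDICT (by name: the statement is the Claim_ definition above) =====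
theorem bar_spec : Claim_equal_bar := by
  intro n p _ _
  unfold Spec_bar bar_alt
  rw [barLoop_eq_A n.toNat n p [] le_rfl]
  exact bar_eq_loopA n.toNat n p le_rfl
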